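-- pv_equiv track=rewrite | github.com/park-seonju/Algorithm | programmers/모의고사.py | solution
-- ===== SOURCE A (Python) =====
-- def solution(answers):
--     answer = []
--     one=0
--     two=0
--     three=0
--     check=0
--     check_three=0
--     for i in range(len(answers)):
--         if i%5==0 and answers[i]==1:one+=1
--         elif i%5==1 and answers[i]==2:one+=1
--         elif i%5==2 and answers[i]==3:one+=1
--         elif i%5==3 and answers[i]==4:one+=1
--         elif i%5==4 and answers[i]==5:one+=1
--         if i%2==0 and answers[i]==2: two+=1
--         if i%2:
--             if check==0 and answers[i]==1:two+=1
--             elif check==1 and answers[i]==3:two+=1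
--             elif check==2 and answers[i]==4:two+=1
--             elif check==3 and answers[i]==5:two+=1
--             check+=1
--         if check_three==0 and answers[i]==3:three+=1
--         elif check_three==1 and answers[i]==1:three+=1
--         elif check_three==2 and answers[i]==2:three+=1
--         elif check_three==3 and answers[i]==4:three+=1
--         elif check_three==4 and answers[i]==5:three+=1
--         if check==4:check=0
--         if i%2:
--             check_three+=1
--             if check_three==5:check_three=0
--     num_list=[]
--     num_list.append(one)
--     num_list.append(two)
--     num_list.append(three)
--     for i in range(3):
--         if num_list[i] == max(one,two,three):
--             answer.append(i+1)
--     return answer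
-- ===== SOURCE B (Python) =====
-- def solution(answers):
--     # one counting pass: histogram keyed by (index mod 40, answer); 40 = lcm(5, 8, 10),
--     # so every pattern's expected answer at position i depends only on i % 40.
--     counts = {}
--     for i, a in enumerate(answers):
--         key = (i % 40, a)
--         counts[key] = counts.get(key, 0) + 1
--     patterns = [[1, 2, 3, 4, 5],
--                 [2, 1, 2, 3, 2, 4, 2, 5],
--                 [3, 3, 1, 1, 2, 2, 4, 4, 5, 5]]
--     scores = [sum(counts.get((r, p[r % len(p)]), 0) for r in range(40)) for p in patterns]
--     best = max(scores)
--     return [k + 1 for k in range(3) if scores[k] == best]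
-- ===== Notes on version B (the rewrite author's own statement) =====
-- stated objective: alternative
-- what changed: A compares every answer against three unrolled modular-counter branch chains in one pass; B instead makes one counting pass that builds a histogram keyed by (index mod 40, answer) (40 = lcm of the pattern periods) and then computes each student's score purely from 40 table lookups against the cyclic pattern, with no per-element pattern comparison.
import Mathlib
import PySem

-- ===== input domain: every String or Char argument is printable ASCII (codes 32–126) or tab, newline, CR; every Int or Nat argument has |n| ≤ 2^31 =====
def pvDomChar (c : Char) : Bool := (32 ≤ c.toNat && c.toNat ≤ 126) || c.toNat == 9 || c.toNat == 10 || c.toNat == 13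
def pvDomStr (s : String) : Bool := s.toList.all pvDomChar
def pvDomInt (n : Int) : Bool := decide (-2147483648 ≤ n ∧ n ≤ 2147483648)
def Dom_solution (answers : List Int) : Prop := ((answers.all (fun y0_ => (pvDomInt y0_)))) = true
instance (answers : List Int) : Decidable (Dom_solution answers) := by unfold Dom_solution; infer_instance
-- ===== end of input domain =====

-- B replaces A's per-element modular-counter branch chains by one counting pass into a
-- histogram keyed by (index mod 40, answer), scoring each pattern from 40 table lookups
-- (objective: alternative algorithm, same O(n) cost).


-- ===== PORT A =====
-- one loop iteration of A: state (one, two, three, check, check_three), index i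
def solutionStep (answers : List Int) (s : Int × Int × Int × Int × Int) (i : Int) :
    Int × Int × Int × Int × Int :=
  let a := PySem.List.pyGetD answers i 0   -- answers[i]; i ∈ range(len) is in range
  let one := s.1; let two := s.2.1; let three := s.2.2.1
  let check := s.2.2.2.1; let check3 := s.2.2.2.2
  let one :=
    if PySem.Int.mod i 5 = 0 ∧ a = 1 then one + 1
    else if PySem.Int.mod i 5 = 1 ∧ a = 2 then one + 1
    else if PySem.Int.mod i 5 = 2 ∧ a = 3 then one + 1
    else if PySem.Int.mod i 5 = 3 ∧ a = 4 then one + 1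
    else if PySem.Int.mod i 5 = 4 ∧ a = 5 then one + 1
    else one
  let two := if PySem.Int.mod i 2 = 0 ∧ a = 2 then two + 1 else two
  -- `if i%2:` — truthiness of i % 2
  let tc : Int × Int :=
    if PySem.Int.mod i 2 ≠ 0 then
      (if check = 0 ∧ a = 1 then two + 1
       else if check = 1 ∧ a = 3 then two + 1
       else if check = 2 ∧ a = 4 then two + 1
       else if check = 3 ∧ a = 5 then two + 1
       else two, check + 1)
    else (two, check)
  let two := tc.1; let check := tc.2
  let three :=
    if check3 = 0 ∧ a = 3 then three + 1
    else if check3 = 1 ∧ a = 1 then three + 1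
    else if check3 = 2 ∧ a = 2 then three + 1
    else if check3 = 3 ∧ a = 4 then three + 1
    else if check3 = 4 ∧ a = 5 then three + 1
    else three
  let check := if check = 4 then 0 else check
  let check3 :=
    if PySem.Int.mod i 2 ≠ 0 then
      (if check3 + 1 = 5 then 0 else check3 + 1)
    else check3
  (one, two, three, check, check3)

def solution (answers : List Int) : List Int :=
  let s := (PySem.List.pyRange 0 (PySem.List.len answers) 1).foldl
             (solutionStep answers) (0, 0, 0, 0, 0)
  let numList := [s.1, s.2.1, s.2.2.1]
  let m := max (max s.1 s.2.1) s.2.2.1   -- max(one, two, three)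
  (PySem.List.pyRange 0 3 1).foldl
    (fun acc i => if PySem.List.pyGetD numList i 0 = m then acc ++ [i + 1] else acc) []

-- ===== PORT B =====
-- counts[(i % 40, a)] = counts.get(key, 0) + 1 over enumerate(answers)
def altCounts (answers : List Int) : PySem.Dict (Int × Int) Int :=
  (PySem.List.enumerate answers 0).foldl
    (fun d ia =>
      -- key = (i % 40, a); written inline (Python binds it to `key` first)
      d.insert (PySem.Int.mod ia.1 40, ia.2)
        (d.getD (PySem.Int.mod ia.1 40, ia.2) 0 + 1))
    PySem.Dict.empty

-- sum(counts.get((r, p[r % len(p)]), 0) for r in range(40))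
def altScore (counts : PySem.Dict (Int × Int) Int) (p : List Int) : Int :=
  ((PySem.List.pyRange 0 40 1).map
    (fun r => counts.getD (r, PySem.List.pyGetD p (PySem.Int.mod r (PySem.List.len p)) 0) 0)).sum

def solution_alt (answers : List Int) : List Int :=
  let counts := altCounts answers
  let scores := [altScore counts [1, 2, 3, 4, 5],
                 altScore counts [2, 1, 2, 3, 2, 4, 2, 5],
                 altScore counts [3, 3, 1, 1, 2, 2, 4, 4, 5, 5]]
  let best := max (max (scores.getD 0 0) (scores.getD 1 0)) (scores.getD 2 0)   -- max(scores)
  ((List.range 3).filter (fun k => scores.getD k 0 = best)).map (fun (k : Nat) => (k : Int) + 1)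

-- ===== PRECONDITION & SPEC =====
def Spec_solution (answers : List Int) (out : List Int) : Prop := out = solution_alt answers
instance (answers : List Int) (out : List Int) : Decidable (Spec_solution answers out) := by unfold Spec_solution; infer_instance

-- ===== CLAIM (what is proved, stated in full; the proofs are below) =====
def Claim_equal_solution : Prop := ∀ (answers : List Int), Dom_solution answers → Spec_solution answers (solution answers)

-- ===== LEMMAS AND PROOFS =====
-- partial score of the first n indices against a cyclic pattern
def partScore (answers pattern : List Int) (n : Nat) : Int :=
  ((List.range n).map
    (fun k => if answers.getD k 0 = pattern.getD (k % pattern.length) 0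
              then (1 : Int) else 0)).sum

lemma step_eq (answers : List Int) (n : Nat) (c1 c2 c3 : Int) :
    solutionStep answers (c1, c2, c3, ((n / 2 % 4 : Nat) : Int), ((n / 2 % 5 : Nat) : Int)) (n : Int)
      = (c1 + (if answers.getD n 0 = [1,2,3,4,5].getD (n % 5) 0 then 1 else 0),
         c2 + (if answers.getD n 0 = [2,1,2,3,2,4,2,5].getD (n % 8) 0 then 1 else 0),
         c3 + (if answers.getD n 0 = [3,3,1,1,2,2,4,4,5,5].getD (n % 10) 0 then 1 else 0),
         (((n+1) / 2 % 4 : Nat) : Int), (((n+1) / 2 % 5 : Nat) : Int)) := by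
  have e5 : PySem.Int.mod (n : Int) 5 = ((n % 5 : Nat) : Int) := by
    exact_mod_cast PySem.Int.mod_natCast n 5
  have e2 : PySem.Int.mod (n : Int) 2 = ((n % 2 : Nat) : Int) := by
    exact_mod_cast PySem.Int.mod_natCast n 2
  simp only [solutionStep, e5, e2, PySem.List.pyGetD_natCast]
  generalize answers.getD n 0 = a
  obtain ⟨q, r, hr, hn⟩ : ∃ q r, r < 2 ∧ n = 2 * q + r :=
    ⟨n / 2, n % 2, Nat.mod_lt _ (by norm_num), by omega⟩
  subst hn
  interval_cases r
  · -- n even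
    simp only [show (2*q+0)%2 = 0 from by omega, Nat.cast_zero, ne_eq, not_true_eq_false,
      if_false]
    rw [show (2*q+0)%8 = 2*(q%4) from by omega, show (2*q+0)%10 = 2*(q%5) from by omega,
      show (2*q+0+1)/2 = q from by omega, show (2*q+0)/2 = q from by omega]
    simp only [Prod.mk.injEq]
    refine ⟨?_, ?_, ?_, ?_, trivial⟩
    · obtain ⟨j, hj, hq⟩ : ∃ j, j < 5 ∧ (2*q+0)%5 = j := ⟨_, by omega, rfl⟩
      rw [hq]; interval_cases j <;> simp <;> split_ifs <;> omega
    · obtain ⟨j, hj, hq⟩ : ∃ j, j < 4 ∧ q%4 = j := ⟨_, by omega, rfl⟩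
      rw [hq]; interval_cases j <;> simp <;> split_ifs <;> omega
    · obtain ⟨j, hj, hq⟩ : ∃ j, j < 5 ∧ q%5 = j := ⟨_, by omega, rfl⟩
      rw [hq]; interval_cases j <;> simp <;> split_ifs <;> omega
    · split_ifs <;> omega
  · -- n odd
    simp only [show (2*q+1)%2 = 1 from by omega, Nat.cast_one, ne_eq, one_ne_zero,
      not_false_eq_true, if_true]
    rw [show (2*q+1)%8 = 2*(q%4)+1 from by omega, show (2*q+1)%10 = 2*(q%5)+1 from by omega,
      show (2*q+1+1)/2 = q+1 from by omega, show (2*q+1)/2 = q from by omega]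
    simp only [Prod.mk.injEq]
    refine ⟨?_, ?_, ?_, ?_, ?_⟩
    · obtain ⟨j, hj, hq⟩ : ∃ j, j < 5 ∧ (2*q+1)%5 = j := ⟨_, by omega, rfl⟩
      rw [hq]; interval_cases j <;> simp <;> split_ifs <;> omega
    · obtain ⟨j, hj, hq⟩ : ∃ j, j < 4 ∧ q%4 = j := ⟨_, by omega, rfl⟩
      rw [hq]; interval_cases j <;> simp <;> split_ifs <;> omega
    · obtain ⟨j, hj, hq⟩ : ∃ j, j < 5 ∧ q%5 = j := ⟨_, by omega, rfl⟩
      rw [hq]; interval_cases j <;> simp <;> split_ifs <;> omega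
    · split_ifs <;> omega
    · split_ifs <;> omega

lemma partScore_succ (answers pattern : List Int) (n : Nat) :
    partScore answers pattern (n + 1)
      = partScore answers pattern n
        + (if answers.getD n 0 = pattern.getD (n % pattern.length) 0 then 1 else 0) := by
  simp [partScore, List.range_succ]

lemma fold_inv (answers : List Int) (n : Nat) :
    List.foldl (solutionStep answers) (0, 0, 0, 0, 0) (List.map (fun (k : Nat) => (k : Int)) (List.range n))
      = (partScore answers [1, 2, 3, 4, 5] n,
         partScore answers [2, 1, 2, 3, 2, 4, 2, 5] n,
         partScore answers [3, 3, 1, 1, 2, 2, 4, 4, 5, 5] n,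
         ((n / 2 % 4 : Nat) : Int), ((n / 2 % 5 : Nat) : Int)) := by
  induction n with
  | zero => simp [partScore]
  | succ n ih =>
    rw [List.range_succ, List.map_append, List.foldl_append, ih]
    simp only [List.map_cons, List.map_nil, List.foldl_cons, List.foldl_nil]
    rw [step_eq, partScore_succ, partScore_succ, partScore_succ]
    norm_num

-- ---------- B-side lemmas ----------
-- the key of entry k: (k % 40, answers[k])
def keyAt (answers : List Int) (k : Nat) : Int × Int :=
  (((k % 40 : Nat) : Int), answers.getD k 0)

lemma counts_getD (answers : List Int) (key : Int × Int) :
    (altCounts answers).getD key 0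
      = (((List.range answers.length).map (keyAt answers)).count key : Int) := by
  have hmap : (PySem.List.enumerate answers 0).map (fun ia => (PySem.Int.mod ia.1 40, ia.2))
      = (List.range answers.length).map (keyAt answers) := by
    rw [PySem.List.enumerate_eq_map_pyRange answers 0, PySem.List.len_eq,
      PySem.List.pyRange_zero_nat, List.map_map, List.map_map]
    refine List.map_congr_left (fun k _ => ?_)
    simp only [Function.comp, keyAt, Prod.mk.injEq, PySem.List.pyGetD_natCast, and_true]
    exact_mod_cast PySem.Int.mod_natCast k 40
  rw [altCounts, ← List.foldl_map (f := fun (ia : Int × Int) => (PySem.Int.mod ia.1 40, ia.2))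
      (g := fun (d : PySem.Dict (Int × Int) Int) x => d.insert x (d.getD x 0 + 1)),
    hmap, PySem.Dict.getD_foldl_insert_add_one, PySem.Dict.getD_empty]
  omega

-- sum over range(40) of an indicator hitting the single residue m
lemma indicator_sum (m : Nat) (hm : m < 40) (x : Int) (h : Int → Int) :
    ((PySem.List.pyRange 0 40 1).map
      (fun r => if ((((m : Nat) : Int), x) == (r, h r)) = true then (1 : Int) else 0)).sum
      = if x = h ((m : Nat) : Int) then 1 else 0 := by
  rw [show (40 : Int) = ((40 : Nat) : Int) from rfl, PySem.List.pyRange_zero_nat, List.map_map]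
  have hp : ∀ k : Nat,
      ((fun r => if ((((m : Nat) : Int), x) == (r, h r)) = true then (1 : Int) else 0) ∘
        (fun (k : Nat) => (k : Int))) k
      = if (decide (k = m) && decide (x = h ((m : Nat) : Int))) = true then (1 : Int) else 0 := by
    intro k
    simp only [Function.comp, beq_iff_eq, Prod.mk.injEq]
    by_cases hkm : k = m
    · subst hkm; simp
    · have : ¬((m : Int) = (k : Int)) := by exact_mod_cast (Ne.symm hkm)
      simp [this, hkm]
  rw [List.map_congr_left (fun k _ => hp k), PySem.List.sum_map_ite_one_zero]
  by_cases hx : x = h ((m : Nat) : Int)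
  · have he : (fun (k : Nat) => decide (k = m)) = (fun k => k == m) := by
      funext k; rw [Bool.eq_iff_iff]; simp
    simp only [hx, decide_true, Bool.and_true, he]
    have h2 : List.countP (fun k => k == m) (List.range 40) = List.count m (List.range 40) := rfl
    rw [h2, List.count_range]
    simp [hm]
  · simp [hx]

lemma altScore_eq (answers p : List Int) (hdvd : p.length ∣ 40) :
    altScore (altCounts answers) p = partScore answers p answers.length := by
  have hmodlen : ∀ k : Nat, PySem.Int.mod ((k % 40 : Nat) : Int) (PySem.List.len p)
      = ((k % 40 % p.length : Nat) : Int) := by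
    intro k
    rw [PySem.List.len_eq]
    exact_mod_cast PySem.Int.mod_natCast (k % 40) p.length
  -- induction on the length of answers' prefix
  suffices H : ∀ n : Nat,
      ((PySem.List.pyRange 0 40 1).map
        (fun r => ((((List.range n).map (keyAt answers)).count
            (r, PySem.List.pyGetD p (PySem.Int.mod r (PySem.List.len p)) 0) : Nat) : Int))).sum
      = partScore answers p n by
    rw [altScore]
    have := H answers.length
    rw [← this]
    congr 1
    refine List.map_congr_left (fun r _ => ?_)
    rw [counts_getD]
  intro n
  induction n with
  | zero =>
    simp only [List.range_zero, List.map_nil, List.count_nil, Nat.cast_zero, partScore,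
      List.sum_nil]
    rw [PySem.List.sum_map_const_int]
    ring
  | succ n ih =>
    rw [List.range_succ, List.map_append, partScore_succ, ← ih]
    simp only [List.map_singleton, List.count_append, List.count_singleton]
    have split : ∀ r : Int,
        ((((List.range n).map (keyAt answers)).count
            (r, PySem.List.pyGetD p (PySem.Int.mod r (PySem.List.len p)) 0)
          + if (keyAt answers n == (r, PySem.List.pyGetD p (PySem.Int.mod r (PySem.List.len p)) 0)) = true then 1 else 0 : Nat) : Int)
        = ((((List.range n).map (keyAt answers)).count
            (r, PySem.List.pyGetD p (PySem.Int.mod r (PySem.List.len p)) 0) : Nat) : Int)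
          + (if (keyAt answers n == (r, PySem.List.pyGetD p (PySem.Int.mod r (PySem.List.len p)) 0)) = true then (1 : Int) else 0) := by
      intro r; split_ifs <;> push_cast <;> ring
    rw [List.map_congr_left (fun r _ => split r), PySem.List.sum_map_add_int]
    congr 1
    have hmn : n % 40 < 40 := Nat.mod_lt _ (by norm_num)
    have := indicator_sum (n % 40) hmn (answers.getD n 0)
      (fun r => PySem.List.pyGetD p (PySem.Int.mod r (PySem.List.len p)) 0)
    rw [show keyAt answers n = (((n % 40 : Nat) : Int), answers.getD n 0) from rfl, this]
    rw [hmodlen n, PySem.List.pyGetD_natCast, Nat.mod_mod_of_dvd n hdvd]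

-- ===== VERDICT (by name: the statement is the Claim_ definition above) =====
theorem solution_spec : Claim_equal_solution := by
  intro answers _
  unfold Spec_solution
  simp only [solution, solution_alt, PySem.List.len_eq, PySem.List.pyRange_zero_nat,
    fold_inv]
  rw [altScore_eq answers [1,2,3,4,5] (by norm_num),
      altScore_eq answers [2,1,2,3,2,4,2,5] (by norm_num),
      altScore_eq answers [3,3,1,1,2,2,4,4,5,5] (by norm_num)]
  set s1 := partScore answers [1, 2, 3, 4, 5] answers.length
  set s2 := partScore answers [2, 1, 2, 3, 2, 4, 2, 5] answers.length
  set s3 := partScore answers [3, 3, 1, 1, 2, 2, 4, 4, 5, 5] answers.length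
  rw [show PySem.List.pyRange 0 3 1 = [0, 1, 2] from by decide]
  rw [show List.range 3 = [0, 1, 2] from by rfl]
  simp only [List.foldl_cons, List.foldl_nil, List.filter_cons, List.filter_nil,
    decide_eq_true_eq,
    show PySem.List.pyGetD [s1, s2, s3] 0 0 = s1 from rfl,
    show PySem.List.pyGetD [s1, s2, s3] 1 0 = s2 from rfl,
    show PySem.List.pyGetD [s1, s2, s3] 2 0 = s3 from rfl,
    show [s1, s2, s3].getD 0 0 = s1 from rfl,
    show [s1, s2, s3].getD 1 0 = s2 from rfl,
    show [s1, s2, s3].getD 2 0 = s3 from rfl]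
  split_ifs <;> simp
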